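-- pv_equiv track=rewrite | github.com/zroyer/patterns-to-match | patterns_to_match.py | get_ordered_matches
-- ===== SOURCE A (Python) =====
-- def get_ordered_matches(patterns, path):
--     """
--     Appends all patterns that match the path into a list of tuples, with the
--     pattern and the number of wildcards it contains as the tuple's respective
--     values. After ordering the list with the lowest-count matching pattern(s)
--     first, we return a filtered list with only these lowest-count matching
--     pattern(s).
--     """
--     matching_patterns = []
--     for pattern in patterns:
--         if is_match(pattern, path):
--             matching_patterns.append((pattern, pattern.count('*')))
--
--     incremented_patterns = sorted(matching_patterns, key=lambda x: x[1])
--     return [tup[0] for tup in incremented_patterns if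
--             tup[1] == incremented_patterns[0][1]]
--
-- def is_match(pattern, path):
--     """
--     A matching pattern is one where every index in the pattern must exactly
--     match the corresponding index, in the path, as well as contain the same
--     number of indices. A wildcard can match any string in the path.
--     """
--     pattern = pattern.split(',')
--     if len(pattern) != len(path):
--         return False
--     for i in range(len(path)):
--         if pattern[i] != '*' and pattern[i] != path[i]:
--             return False
--     return True
-- ===== SOURCE B (Python) =====
-- def is_match(pattern, path):
--     parts = pattern.split(',')
--     if len(parts) != len(path):
--         return False
--     return all(a == '*' or a == b for a, b in zip(parts, path))
--
--
-- def get_ordered_matches(patterns, path):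
--     best = None
--     result = []
--     for pattern in patterns:
--         if is_match(pattern, path):
--             c = pattern.count('*')
--             if best is None or c < best:
--                 best = c
--                 result = [pattern]
--             elif c == best:
--                 result.append(pattern)
--     return result
-- ===== Notes on version B (the rewrite author's own statement) =====
-- stated objective: alternative
-- what changed: B replaces A's collect-then-stable-sort-then-filter-by-head-count pipeline with a single pass that tracks the minimum wildcard count and its pattern list as it goes, and checks a pattern against the path with zip/all instead of an index loop.
import Mathlib
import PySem

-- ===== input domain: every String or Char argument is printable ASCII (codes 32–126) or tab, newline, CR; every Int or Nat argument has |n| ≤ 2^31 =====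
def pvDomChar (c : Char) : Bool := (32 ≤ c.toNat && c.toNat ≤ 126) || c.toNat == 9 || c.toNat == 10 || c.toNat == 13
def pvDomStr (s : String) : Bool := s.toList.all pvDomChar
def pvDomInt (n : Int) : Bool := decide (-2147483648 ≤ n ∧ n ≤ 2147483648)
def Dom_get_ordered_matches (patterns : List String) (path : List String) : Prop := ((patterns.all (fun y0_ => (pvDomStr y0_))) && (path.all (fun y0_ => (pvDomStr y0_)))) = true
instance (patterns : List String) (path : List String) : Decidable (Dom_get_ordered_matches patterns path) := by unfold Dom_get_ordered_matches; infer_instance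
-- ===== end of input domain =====

-- B replaces A's "collect, sort by wildcard count, filter by the head's count" with a single
-- min-tracking pass (alternative decomposition; is_match is checked by zip instead of an index loop).


-- ===== PORT A =====
-- the body of A's "for i in range(len(path)): …" with early return False;
-- pyGetD with default "" is exact: every i comes from range(len(path)) and parts has the same length
def pvIsMatchLoop (parts : List String) (path : List String) : List Int → Bool
  | [] => true
  | i :: rest =>
    if PySem.List.pyGetD parts i "" ≠ "*" ∧ PySem.List.pyGetD parts i "" ≠ PySem.List.pyGetD path i ""
    then false
    else pvIsMatchLoop parts path rest

def pv_is_match (pattern : String) (path : List String) : Bool :=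
  let parts := (PySem.Str.split? pattern ",").getD []  -- sep is the non-empty literal ",", so split? is always some (exact)
  if parts.length ≠ path.length then false
  else pvIsMatchLoop parts path (PySem.List.pyRange 0 (path.length : Int) 1)

def get_ordered_matches (patterns : List String) (path : List String) : List String :=
  let matching := patterns.foldl
    (fun acc p => if pv_is_match p path then acc ++ [(p, PySem.Str.count p "*")] else acc)
    ([] : List (String × Nat))
  let inc := PySem.List.sorted matching (fun x => x.2)
  match inc with
  | [] => []  -- the comprehension is empty, so inc[0] is never evaluated
  | h :: _ => (inc.filter (fun t => t.2 == h.2)).map (fun t => t.1)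

-- ===== PORT B =====
def pv_is_match_alt (pattern : String) (path : List String) : Bool :=
  let parts := (PySem.Str.split? pattern ",").getD []  -- sep is the non-empty literal ",", so split? is always some (exact)
  if parts.length ≠ path.length then false
  else (parts.zip path).all (fun ab => ab.1 == "*" || ab.1 == ab.2)

def pvBStep (path : List String) (st : Option Nat × List String) (pattern : String) :
    Option Nat × List String :=
  if pv_is_match_alt pattern path then
    let c := PySem.Str.count pattern "*"
    match st.1 with
    | none => (some c, [pattern])
    | some b =>
      if c < b then (some c, [pattern])
      else if c == b then (some b, st.2 ++ [pattern])
      else st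
  else st

def get_ordered_matches_alt (patterns : List String) (path : List String) : List String :=
  (patterns.foldl (pvBStep path) (none, [])).2

-- ===== PRECONDITION & SPEC =====
def Spec_get_ordered_matches (patterns : List String) (path : List String) (out : List String) : Prop := out = get_ordered_matches_alt patterns path
instance (patterns : List String) (path : List String) (out : List String) : Decidable (Spec_get_ordered_matches patterns path out) := by unfold Spec_get_ordered_matches; infer_instance

-- ===== CLAIM (what is proved, stated in full; the proofs are below) =====
def Claim_equal_get_ordered_matches : Prop := ∀ (patterns : List String) (path : List String), Dom_get_ordered_matches patterns path → Spec_get_ordered_matches patterns path (get_ordered_matches patterns path)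

-- ===== LEMMAS AND PROOFS =====

-- the two is_match variants agree
lemma pvIsMatchLoop_eq (parts path : List String) (hlen : parts.length = path.length) :
    ∀ k i, i + k = path.length →
      pvIsMatchLoop parts path (PySem.List.pyRange (i : Int) (path.length : Int) 1) =
        ((parts.drop i).zip (path.drop i)).all (fun ab => ab.1 == "*" || ab.1 == ab.2) := by
  intro k
  induction k with
  | zero =>
    intro i hi
    rw [PySem.List.pyRange_one_eq_nil (by exact_mod_cast (by omega : path.length ≤ i))]
    rw [List.drop_eq_nil_of_le (by omega), List.drop_eq_nil_of_le (by omega)]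
    simp [pvIsMatchLoop]
  | succ k ih =>
    intro i hi
    have hilt : i < path.length := by omega
    have hiltp : i < parts.length := by omega
    rw [PySem.List.pyRange_one_cons (by exact_mod_cast hilt)]
    have hstep : ((i : Int) + 1) = ((i + 1 : Nat) : Int) := by push_cast; ring
    rw [hstep]
    rw [List.drop_eq_getElem_cons hilt, List.drop_eq_getElem_cons hiltp]
    simp only [pvIsMatchLoop, List.zip_cons_cons, List.all_cons]
    rw [PySem.List.pyGetD_eq_getElem parts "" (by positivity) (by exact_mod_cast hiltp),
        PySem.List.pyGetD_eq_getElem path "" (by positivity) (by exact_mod_cast hilt)]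
    simp only [Int.toNat_natCast]
    rw [ih (i + 1) (by omega)]
    by_cases h1 : parts[i] = "*" <;> by_cases h2 : parts[i] = path[i] <;> simp [h1, h2]

lemma pv_is_match_eq (pattern : String) (path : List String) :
    pv_is_match pattern path = pv_is_match_alt pattern path := by
  unfold pv_is_match pv_is_match_alt
  by_cases h : ((PySem.Str.split? pattern ",").getD []).length = path.length
  · simp only [h, ne_eq, not_true_eq_false, if_false]
    have := pvIsMatchLoop_eq ((PySem.Str.split? pattern ",").getD []) path h path.length 0 (by omega)
    simpa using this
  · simp [h]

-- matched (pattern, wildcard-count) pairs, as A's first loop builds them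
def pvMsOf (path : List String) (patterns : List String) : List (String × Nat) :=
  patterns.foldl
    (fun acc p => if pv_is_match_alt p path then acc ++ [(p, PySem.Str.count p "*")] else acc) []

lemma pvMsOf_eq (path : List String) (ps : List String) :
    pvMsOf path ps =
      (ps.filter (fun p => pv_is_match_alt p path)).map (fun p => (p, PySem.Str.count p "*")) := by
  simpa using PySem.List.foldl_append_if (fun p => pv_is_match_alt p path)
    (fun p => (p, PySem.Str.count p "*")) ps []

lemma pvMsOf_cons (path : List String) (p : String) (ps : List String) :
    pvMsOf path (p :: ps) =
      (if pv_is_match_alt p path then [(p, PySem.Str.count p "*")] else []) ++ pvMsOf path ps := by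
  simp only [pvMsOf_eq, List.filter_cons]
  by_cases h : pv_is_match_alt p path <;> simp [h]

-- stability of insertion into a sorted list: the block of any fixed key keeps original order
lemma pvFilter_insertBy {α : Type} (key : α → Nat) (m : Nat) (x : α) (ys : List α)
    (hs : ys.Pairwise (fun a b => key a ≤ key b)) :
    (PySem.List.insertBy (fun a b => decide (key a < key b)) x ys).filter (fun y => key y == m)
      = ys.filter (fun y => key y == m) ++ (if key x == m then [x] else []) := by
  induction ys with
  | nil => by_cases h : key x = m <;> simp [PySem.List.insertBy, h]
  | cons y ys ih =>
    rw [List.pairwise_cons] at hs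
    simp only [PySem.List.insertBy]
    by_cases hb : key x < key y
    · simp only [hb, decide_true, if_true]
      by_cases hx : key x = m
      · have hfilter : (y :: ys).filter (fun z => key z == m) = [] := by
          rw [List.filter_eq_nil_iff]
          intro z hz
          rcases List.mem_cons.mp hz with rfl | hz'
          · simp; omega
          · have := hs.1 z hz'; simp; omega
        simp [hfilter, hx]
      · simp [List.filter_cons, hx]
    · simp only [hb, decide_false, Bool.false_eq_true, if_false]
      rw [List.filter_cons, List.filter_cons, ih hs.2]
      by_cases hy : key y = m <;> simp [hy]

-- stability of PySem.List.sorted: filtering one key class commutes with the sort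
lemma pvFilter_sorted {α : Type} (key : α → Nat) (xs : List α) (m : Nat) :
    (PySem.List.sorted xs key).filter (fun y => key y == m) = xs.filter (fun y => key y == m) := by
  induction xs using List.reverseRecOn with
  | nil => simp [PySem.List.sorted_eq_foldl_insertBy]
  | append_singleton xs x ih =>
    rw [PySem.List.sorted_eq_foldl_insertBy, List.foldl_append, List.foldl_cons, List.foldl_nil,
        ← PySem.List.sorted_eq_foldl_insertBy]
    rw [pvFilter_insertBy key m x _ (PySem.List.sorted_pairwise xs key)]
    rw [ih, List.filter_append]
    by_cases h : key x = m <;> simp [h]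

def pvMinKey (b : Nat) (l : List (String × Nat)) : Nat := l.foldl (fun acc x => min acc x.2) b

lemma pvMinKey_le (b : Nat) (l : List (String × Nat)) : pvMinKey b l ≤ b := by
  induction l generalizing b with
  | nil => simp [pvMinKey]
  | cons x l ih =>
    have := ih (min b x.2)
    simp only [pvMinKey, List.foldl_cons] at *
    omega
lemma pvMinKey_le_mem (b : Nat) (l : List (String × Nat)) : ∀ x ∈ l, pvMinKey b l ≤ x.2 := by
  induction l generalizing b with
  | nil => simp
  | cons y l ih =>
    intro x hx
    rcases List.mem_cons.mp hx with rfl | hx'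
    · have := pvMinKey_le (min b x.2) l
      simp only [pvMinKey, List.foldl_cons] at *
      omega
    · exact ih (min b y.2) x hx'

lemma pvMinKey_mem (b : Nat) (l : List (String × Nat)) :
    pvMinKey b l = b ∨ ∃ x ∈ l, pvMinKey b l = x.2 := by
  induction l generalizing b with
  | nil => left; rfl
  | cons y l ih =>
    simp only [pvMinKey, List.foldl_cons]
    rcases ih (min b y.2) with h | ⟨x, hx, hxe⟩
    · by_cases hby : b ≤ y.2
      · left; simp only [pvMinKey] at h; omega
      · right; exact ⟨y, by simp, by simp only [pvMinKey] at h; omega⟩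
    · right; exact ⟨x, by simp [hx], hxe⟩

lemma pvMinKey_cons (b : Nat) (p : String × Nat) (l : List (String × Nat)) :
    pvMinKey b (p :: l) = pvMinKey (min b p.2) l := rfl

-- B's loop from a live state (some b, r)
lemma pvBfold_some (path : List String) :
    ∀ (ps : List String) (b : Nat) (r : List String),
      ps.foldl (pvBStep path) (some b, r) =
        (some (pvMinKey b (pvMsOf path ps)),
         (if pvMinKey b (pvMsOf path ps) == b then r else []) ++
           ((pvMsOf path ps).filter (fun t => t.2 == pvMinKey b (pvMsOf path ps))).map (fun t => t.1)) := by
  intro ps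
  induction ps with
  | nil => intro b r; simp [pvMsOf, pvMinKey]
  | cons p ps ih =>
    intro b r
    rw [List.foldl_cons]
    by_cases hm : pv_is_match_alt p path
    · have hstep : pvBStep path (some b, r) p =
          (if PySem.Str.count p "*" < b then (some (PySem.Str.count p "*"), [p])
           else if PySem.Str.count p "*" == b then (some b, r ++ [p]) else (some b, r)) := by
        unfold pvBStep; rw [if_pos hm]
      rw [pvMsOf_cons]
      simp only [hm, if_true, List.singleton_append]
      set c := PySem.Str.count p "*" with hc
      rw [hstep]
      rw [pvMinKey_cons]
      by_cases h1 : c < b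
      · rw [if_pos h1]
        rw [ih c [p]]
        have hmin : min b c = c := by omega
        rw [hmin]
        set m := pvMinKey c (pvMsOf path ps) with hmdef
        have hmc : m ≤ c := pvMinKey_le c _
        have hmb : ¬ (m = b) := by omega
        simp only [List.filter_cons]
        by_cases h2 : c = m
        · simp [h2, show (m == b) = false from by simpa using hmb]
        · simp [show (m == c) = false from by simpa using (by omega : ¬ m = c),
                show (c == m) = false from by simpa using h2,
                show (m == b) = false from by simpa using hmb]
      · by_cases h2 : c = b
        · simp only [if_neg h1, show (c == b) = true from by simpa using h2, if_true]
          rw [ih b (r ++ [p])]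
          have hmin : min b c = b := by omega
          rw [hmin]
          set m := pvMinKey b (pvMsOf path ps) with hmdef
          have hmb : m ≤ b := pvMinKey_le b _
          simp only [List.filter_cons]
          by_cases h3 : m = b
          · simp [h3, h2, List.append_assoc]
          · simp [show (m == b) = false from by simpa using h3,
                  show (c == m) = false from by simpa using (by omega : ¬ c = m)]
        · simp only [if_neg h1, show (c == b) = false from by simpa using h2, Bool.false_eq_true, if_false]
          rw [ih b r]
          have hmin : min b c = b := by omega
          rw [hmin]
          set m := pvMinKey b (pvMsOf path ps) with hmdef
          have hmb : m ≤ b := pvMinKey_le b _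
          simp only [List.filter_cons]
          simp [show (c == m) = false from by simpa using (by omega : ¬ c = m)]
    · rw [pvMsOf_cons, if_neg hm, List.nil_append]
      have : pvBStep path (some b, r) p = (some b, r) := by unfold pvBStep; rw [if_neg hm]
      rw [this, ih b r]

-- B's loop from the initial state
lemma pvBfold (path : List String) (ps : List String) :
    ps.foldl (pvBStep path) (none, []) =
      match pvMsOf path ps with
      | [] => (none, [])
      | (p, c) :: ms' =>
        (some (pvMinKey c ms'),
         (((p, c) :: ms').filter (fun t => t.2 == pvMinKey c ms')).map (fun t => t.1)) := by
  induction ps with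
  | nil => simp [pvMsOf]
  | cons p ps ih =>
    rw [List.foldl_cons]
    by_cases hm : pv_is_match_alt p path
    · have hstep : pvBStep path (none, []) p = (some (PySem.Str.count p "*"), [p]) := by
        unfold pvBStep; rw [if_pos hm]
      set c := PySem.Str.count p "*" with hc
      rw [hstep, pvBfold_some path ps c [p], pvMsOf_cons]
      simp only [hm, if_true, List.singleton_append]
      rw [← hc]
      set m := pvMinKey c (pvMsOf path ps) with hmdef
      have hmc : m ≤ c := pvMinKey_le c _
      simp only [List.filter_cons]
      by_cases h2 : c = m
      · simp [h2]
      · simp [show (m == c) = false from by simpa using (by omega : ¬ m = c),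
              show (c == m) = false from by simpa using h2]
    · have hstep : pvBStep path (none, []) p = (none, []) := by unfold pvBStep; rw [if_neg hm]
      rw [hstep, ih, pvMsOf_cons, if_neg hm, List.nil_append]

-- ===== VERDICT (by name: the statement is the Claim_ definition above) =====
theorem get_ordered_matches_spec : Claim_equal_get_ordered_matches := by
  intro patterns path _
  unfold Spec_get_ordered_matches get_ordered_matches get_ordered_matches_alt
  have hmatch : patterns.foldl
      (fun acc p => if pv_is_match p path then acc ++ [(p, PySem.Str.count p "*")] else acc)
      ([] : List (String × Nat)) = pvMsOf path patterns := by
    unfold pvMsOf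
    congr 1
    funext acc p
    rw [pv_is_match_eq]
  rw [hmatch, pvBfold path patterns]
  generalize pvMsOf path patterns = ms
  dsimp only
  cases ms with
  | nil =>
    rw [(PySem.List.sorted_eq_nil_iff ([] : List (String × Nat)) (fun x => x.2) false).mpr rfl]
  | cons pc ms' =>
    obtain ⟨p, c⟩ := pc
    dsimp only
    cases hsorted : PySem.List.sorted ((p, c) :: ms') (fun x => x.2) with
    | nil => exact absurd ((PySem.List.sorted_eq_nil_iff _ _ _).mp hsorted) (by simp)
    | cons h t =>
      have hmem : h ∈ (p, c) :: ms' := by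
        rw [← PySem.List.mem_sorted ((p, c) :: ms') (fun x => x.2) false, hsorted]
        simp
      have hle : ∀ y ∈ (p, c) :: ms', h.2 ≤ y.2 :=
        PySem.List.key_head_sorted_le ((p, c) :: ms') (fun x : String × Nat => x.2) hsorted
      have hm_eq : h.2 = pvMinKey c ms' := by
        have h1 : pvMinKey c ms' ≤ h.2 := by
          rcases List.mem_cons.mp hmem with heq | hmem'
          · rw [heq]; exact pvMinKey_le c ms'
          · exact pvMinKey_le_mem c ms' h hmem'
        have h2 : h.2 ≤ pvMinKey c ms' := by
          rcases pvMinKey_mem c ms' with he | ⟨x, hx, hxe⟩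
          · rw [he]; exact hle (p, c) (by simp)
          · rw [hxe]; exact hle x (by simp [hx])
        omega
      dsimp only
      rw [← hsorted]
      rw [show (fun t : String × Nat => t.2 == h.2)
            = (fun t : String × Nat => (fun y : String × Nat => y.2) t == h.2) from rfl]
      rw [pvFilter_sorted (fun y => y.2) ((p, c) :: ms') h.2]
      rw [hm_eq]
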